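-- pv_equiv track=rewrite | github.com/Saumya25mis/renzen-bot | renzen/src/bot/bot_utils.py | bold_substring
-- ===== SOURCE A (Python) =====
-- def bold_substring(value: str, substring: str) -> str:
--     """Bolds substring while keeping case."""
--
--     # get indexes for occurrences case-insensitive
--     l_value = value.lower()
--     l_substring = substring.lower()
--     res = [i for i in range(len(l_value)) if l_value.startswith(l_substring, i)]
--
--     sub_length = len(substring)
--     bolded_list = list(value)
--
--     bold = "**"
--
--     # use indexes to insert bold markers and keep case
--     offset_index = 0
--     for index in res:
--         bolded_list.insert(index + offset_index, bold)
--         bolded_list.insert(index + offset_index + sub_length + 1, bold)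
--         offset_index += 2  # we are adding to indexes each loop
--
--     bolded_string = "".join(bolded_list)
--
--     return bolded_string
-- ===== SOURCE B (Python) =====
-- def bold_substring(value: str, substring: str) -> str:
--     """Bolds substring while keeping case: single greedy left-to-right scan."""
--     lv = value.lower()
--     ls = substring.lower()
--     m = len(substring)
--     parts = []
--     i = 0
--     while i < len(value):
--         if m and lv.startswith(ls, i):
--             parts.append("**" + value[i:i + m] + "**")
--             i += m
--         else:
--             parts.append(value[i])
--             i += 1
--     return "".join(parts)
-- ===== Notes on version B (the rewrite author's own statement) =====
-- stated objective: alternative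
-- what changed: A first collects every case-insensitive match index and then replays list.insert calls with a growing offset over a char list; B is a single greedy left-to-right scan that emits either a wrapped match (jumping its length) or one character, building the output directly.
-- outside the precondition, e.g. on bold_substring('abc', ''): A returns '****a****b****c', B returns 'abc'; on bold_substring('aaa', 'aa'): A returns '**aa****a**', B returns '**aa**a'
import Mathlib
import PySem

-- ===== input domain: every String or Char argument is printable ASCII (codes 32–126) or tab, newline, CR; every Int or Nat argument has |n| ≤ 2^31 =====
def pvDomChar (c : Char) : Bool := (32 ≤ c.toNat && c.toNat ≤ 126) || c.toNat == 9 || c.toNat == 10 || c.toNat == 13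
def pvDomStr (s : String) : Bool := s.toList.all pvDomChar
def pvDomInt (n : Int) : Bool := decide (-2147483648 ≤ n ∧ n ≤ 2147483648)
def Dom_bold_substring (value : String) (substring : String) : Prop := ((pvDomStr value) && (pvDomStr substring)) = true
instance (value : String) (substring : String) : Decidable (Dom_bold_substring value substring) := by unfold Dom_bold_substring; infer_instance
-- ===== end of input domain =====

-- B replaces A's index-list + offset-insertion replay by a single greedy left-to-right scan (objective: alternative structure, same exact output on Pre_).

-- ===== PORT A =====
-- list(value) is modelled as List (List Char) (a Python list of 1-char strings);
-- l_value.startswith(l_substring, i) is ported by hand as isPrefixOf of drop i.toNat — exact since every i from range(len(l_value)) has 0 ≤ i ≤ len.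
def bold_substring (value : String) (substring : String) : String :=
  let l_value := PySem.Chars.lower value.toList
  let l_substring := PySem.Chars.lower substring.toList
  let res := (PySem.List.pyRange 0 (PySem.List.len l_value) 1).filter
      (fun i => l_substring.isPrefixOf (l_value.drop i.toNat))
  let sub_length := PySem.Str.len substring
  let bolded_list := value.toList.map (fun c => [c])
  let bold := ['*', '*']
  let final := res.foldl
      (fun (st : List (List Char) × Int) index =>
        (PySem.List.insert (PySem.List.insert st.1 (index + st.2) bold)
            (index + st.2 + sub_length + 1) bold,
         st.2 + 2))
      (bolded_list, 0)
  String.ofList (PySem.Chars.join [] final.1)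

-- ===== PORT B =====
-- the while loop of Source B: at each position either wrap a match of length m and jump m, or copy one character
def bsGo (m : Nat) (ls : List Char) : List Char → List Char → List Char
  | [], _ => []
  | c :: vt, l =>
    if _h : m ≠ 0 ∧ ls.isPrefixOf l then
      ['*', '*'] ++ (c :: vt).take m ++ ['*', '*'] ++ bsGo m ls ((c :: vt).drop m) (l.drop m)
    else
      c :: bsGo m ls vt (l.drop 1)
termination_by v _ => v.length
decreasing_by
  · simp only [List.length_drop, List.length_cons]; omega
  · simp only [List.length_cons]; omega

def bold_substring_alt (value : String) (substring : String) : String :=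
  let lv := PySem.Chars.lower value.toList
  let ls := PySem.Chars.lower substring.toList
  let m := substring.toList.length
  String.ofList (bsGo m ls value.toList lv)

-- ===== PRECONDITION & SPEC =====
-- Pre_ excludes the empty substring and values with two OVERLAPPING case-insensitive occurrences: there A's
-- offset-replay of insertions interleaves the ** markers accidentally (e.g. '**aa****a**'), a corner no caller
-- would specify either way; B bolds greedy non-overlapping occurrences there.
def Pre_bold_substring (value : String) (substring : String) : Prop :=
  substring.toList ≠ [] ∧
  ∀ i < value.toList.length, ∀ j < value.toList.length,
    i < j → j < i + substring.toList.length →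
    (PySem.Chars.lower substring.toList).isPrefixOf ((PySem.Chars.lower value.toList).drop i) = true →
    (PySem.Chars.lower substring.toList).isPrefixOf ((PySem.Chars.lower value.toList).drop j) = false
instance (value : String) (substring : String) : Decidable (Pre_bold_substring value substring) := by
  unfold Pre_bold_substring; infer_instance

def pvWitness_bold_substring : String × String := ("Hello hello", "hell")

def Spec_bold_substring (value : String) (substring : String) (out : String) : Prop := out = bold_substring_alt value substring
instance (value : String) (substring : String) (out : String) : Decidable (Spec_bold_substring value substring out) := by unfold Spec_bold_substring; infer_instance

-- ===== CLAIM (what is proved, stated in full; the proofs are below) =====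
def Claim_equal_bold_substring : Prop := ∀ (value : String) (substring : String), Dom_bold_substring value substring → Pre_bold_substring value substring → Spec_bold_substring value substring (bold_substring value substring)

-- ===== LEMMAS AND PROOFS =====

-- Python list.insert with a nonnegative index: splice at the index clamped to the length
theorem pvInsert_nonneg {α : Type} (xs : List α) (i : Int) (v : α) (h : 0 ≤ i) :
    PySem.List.insert xs i v
      = xs.take (min i.toNat xs.length) ++ v :: xs.drop (min i.toNat xs.length) := by
  simp only [PySem.List.insert, PySem.List.sliceIndices]
  rw [if_neg (by omega), if_neg (by norm_num)]
  have : (min i ((xs.length : Int))).toNat = min i.toNat xs.length := by omega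
  rw [this]

theorem pvInsert_cons_pos {α : Type} (x : α) (xs : List α) (i : Int) (v : α) (h : 1 ≤ i) :
    PySem.List.insert (x :: xs) i v = x :: PySem.List.insert xs (i - 1) v := by
  rw [pvInsert_nonneg _ _ _ (by omega), pvInsert_nonneg _ _ _ (by omega)]
  have hk : min i.toNat (x :: xs).length = min (i - 1).toNat xs.length + 1 := by
    simp only [List.length_cons]; omega
  rw [hk]
  simp [List.take_succ_cons, List.drop_succ_cons]

theorem pvJoin_nil (parts : List (List Char)) : PySem.Chars.join [] parts = parts.flatten := by
  simp only [PySem.Chars.join, List.intercalate]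
  induction parts with
  | nil => simp
  | cons p ps ih =>
    cases ps with
    | nil => simp
    | cons q qs => simpa [List.intersperse] using ih

-- A's insertion loop with the offset accumulator made explicit
def pvFoldA (m : Nat) : List Int → Int → List (List Char) → List (List Char)
  | [], _, L => L
  | r :: rs, o, L =>
      pvFoldA m rs (o + 2)
        (PySem.List.insert (PySem.List.insert L (r + o) ['*', '*']) (r + o + (m : Int) + 1) ['*', '*'])

theorem pvFoldl_eq_foldA (m : Nat) (res : List Int) : ∀ (o : Int) (L : List (List Char)),
    (res.foldl
      (fun (st : List (List Char) × Int) index =>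
        (PySem.List.insert (PySem.List.insert st.1 (index + st.2) ['*', '*'])
            (index + st.2 + (m : Int) + 1) ['*', '*'],
         st.2 + 2)) (L, o)).1 = pvFoldA m res o L := by
  induction res with
  | nil => intro o L; simp [pvFoldA]
  | cons r rs ih => intro o L; simpa [pvFoldA] using ih (o + 2) _

theorem pvFoldA_cons_shift (m : Nat) : ∀ (rs : List Int) (o : Int) (x : List Char) (L : List (List Char)),
    (∀ r ∈ rs, 1 ≤ r + o) →
    pvFoldA m rs o (x :: L) = x :: pvFoldA m rs (o - 1) L := by
  intro rs
  induction rs with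
  | nil => intro o x L _; simp [pvFoldA]
  | cons r rs ih =>
    intro o x L h
    have hr : 1 ≤ r + o := h r (by simp)
    simp only [pvFoldA]
    rw [pvInsert_cons_pos _ _ _ _ hr, pvInsert_cons_pos _ _ _ _ (by omega)]
    rw [ih (o + 2) x _ (fun r' hr' => by have := h r' (by simp [hr']); omega)]
    have e1 : r + o - 1 = r + (o - 1) := by ring
    have e2 : r + o + (m : Int) + 1 - 1 = r + (o - 1) + (m : Int) + 1 := by ring
    have e3 : o + 2 - 1 = o - 1 + 2 := by ring
    rw [e1, e2, e3]

theorem pvFoldA_append_shift (m : Nat) : ∀ (X : List (List Char)) (rs : List Int) (o : Int) (Y : List (List Char)),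
    (∀ r ∈ rs, (X.length : Int) ≤ r + o) →
    pvFoldA m rs o (X ++ Y) = X ++ pvFoldA m rs (o - X.length) Y := by
  intro X
  induction X with
  | nil => intro rs o Y _; simp
  | cons x X ih =>
    intro rs o Y h
    have h1 : ∀ r ∈ rs, 1 ≤ r + o := by
      intro r hr; have := h r hr; simp only [List.length_cons] at this; push_cast at this; omega
    rw [List.cons_append, pvFoldA_cons_shift m rs o x (X ++ Y) h1,
      ih rs (o - 1) Y (by intro r hr; have := h r hr; simp only [List.length_cons] at this ⊢; push_cast at this ⊢; omega)]
    have : o - 1 - (X.length : Int) = o - ((x :: X).length : Int) := by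
      simp only [List.length_cons]; push_cast; omega
    rw [this, List.cons_append]

theorem pvFlattenSingles {α : Type} (v : List α) : (v.map (fun x => [x])).flatten = v := by
  induction v with
  | nil => simp
  | cons a t ih => simp [ih]

theorem pvAux (m : Nat) (hm : m ≠ 0) (ls : List Char) :
    ∀ (n : Nat) (v lv : List Char), v.length = n → lv.length = n →
    ∀ (rs : List Int) (o : Int),
    (∀ r ∈ rs, 0 ≤ r + o ∧ (r + o).toNat + m ≤ n ∧ ls <+: lv.drop (r + o).toNat) →
    (∀ j : Nat, ls <+: lv.drop j → (j : Int) ∈ rs.map (· + o)) →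
    rs.Pairwise (fun a b => a + (m : Int) ≤ b) →
    (pvFoldA m rs o (v.map (fun c => [c]))).flatten = bsGo m ls v lv := by
  intro n
  induction n using Nat.strong_induction_on with
  | _ n ih =>
  intro v lv hv hlv rs o hC1 hC2 hPW
  by_cases hP : ls <+: lv
  · -- a match starts at position 0: the head of rs must sit there
    have h0 : (((0:Nat) : Int)) ∈ rs.map (· + o) := hC2 0 (by simpa using hP)
    cases rs with
    | nil => simp at h0
    | cons r rs' =>
      have hr0 : r + o = 0 := by
        rcases List.mem_map.1 h0 with ⟨a, ha, hao⟩
        push_cast at hao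
        rcases List.mem_cons.1 ha with rfl | ha'
        · omega
        · exfalso
          have h1 := (List.pairwise_cons.1 hPW).1 a ha'
          have h2 := (hC1 r (by simp)).1
          omega
      have hmn : m ≤ n := by
        have h3 := (hC1 r (by simp)).2.1
        rw [hr0] at h3; simpa using h3
      obtain ⟨c, vt, rfl⟩ : ∃ c vt, v = c :: vt := by
        cases v with
        | nil => exfalso; simp at hv; omega
        | cons c vt => exact ⟨c, vt, rfl⟩
      -- A side: compute the two inserts of the first match
      have hlen0 : m ≤ ((c :: vt).map (fun x => [x])).length := by
        simp only [List.length_map]; omega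
      simp only [pvFoldA]
      rw [hr0, PySem.List.insert_zero]
      have e1 : (0 : Int) + (m : Int) + 1 = (m : Int) + 1 := by ring
      rw [e1, pvInsert_cons_pos _ _ _ _ (by omega)]
      have e2 : ((m : Int) + 1 - 1) = ((m : Nat) : Int) := by ring
      rw [e2, PySem.List.insert_natCast _ m _ hlen0]
      have hsplit :
          ((['*', '*'] : List Char) :: (List.take m ((c :: vt).map (fun x => [x])) ++ ['*', '*'] :: List.drop m ((c :: vt).map (fun x => [x]))))
            = ((['*', '*'] :: List.take m ((c :: vt).map (fun x => [x])) ++ [['*', '*']])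
                ++ List.drop m ((c :: vt).map (fun x => [x]))) := by
        simp
      rw [hsplit]
      have hXlen : ((['*', '*'] :: List.take m ((c :: vt).map (fun x => [x])) ++ [['*', '*']]) : List (List Char)).length = m + 2 := by
        have hvv : (c :: vt).length = n := hv
        simp only [List.length_cons] at hvv
        simp only [List.length_append, List.length_cons, List.length_take, List.length_map,
          List.length_nil]
        omega
      rw [pvFoldA_append_shift m (['*', '*'] :: List.take m ((c :: vt).map (fun x => [x])) ++ [['*', '*']]) rs' (o + 2)
          (List.drop m ((c :: vt).map (fun x => [x]))) (by
        intro r' hr'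
        have hsp := (List.pairwise_cons.1 hPW).1 r' hr'
        rw [hXlen]
        push_cast
        omega)]
      rw [hXlen]
      have e3 : o + 2 - ((m + 2 : Nat) : Int) = o - m := by push_cast; ring
      rw [e3]
      -- B side
      rw [bsGo]
      rw [dif_pos ⟨hm, List.isPrefixOf_iff_prefix.2 hP⟩]
      have htail :
          (pvFoldA m rs' (o - m) (((c :: vt).drop m).map (fun x => [x]))).flatten
            = bsGo m ls ((c :: vt).drop m) (lv.drop m) := by
        apply ih (n - m) (by omega) _ _ (by simp only [List.length_drop]; omega)
          (by simp only [List.length_drop]; omega)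
        · -- C1 for the tail
          intro r' hr'
          obtain ⟨ha, hb, hc⟩ := hC1 r' (by simp [hr'])
          have hsp := (List.pairwise_cons.1 hPW).1 r' hr'
          refine ⟨by omega, by omega, ?_⟩
          rw [List.drop_drop]
          have h7 : m + (r' + (o - (m : Int))).toNat = (r' + o).toNat := by omega
          rw [h7]
          exact hc
        · -- C2 for the tail
          intro j hj
          rw [List.drop_drop] at hj
          have h4 := hC2 (m + j) hj
          rcases List.mem_map.1 h4 with ⟨a, ha, hao⟩
          rcases List.mem_cons.1 ha with rfl | ha'
          · exfalso; push_cast at hao; omega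
          · exact List.mem_map.2 ⟨a, ha', by push_cast at hao ⊢; omega⟩
        · exact (List.pairwise_cons.1 hPW).2
      rw [List.map_drop] at htail
      have hX : ((['*', '*'] :: List.take m (List.map (fun x => [x]) (c :: vt)) ++ [['*', '*']]) : List (List Char)).flatten
          = ['*', '*'] ++ List.take m (c :: vt) ++ ['*', '*'] := by
        simp only [List.flatten_append, List.flatten_cons, List.flatten_nil, List.append_nil]
        rw [← List.map_take, pvFlattenSingles]
      rw [List.flatten_append, hX, htail]
  · -- no match at position 0
    cases v with
    | nil =>
      have hn0 : n = 0 := by simp at hv; omega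
      cases rs with
      | nil => simp [pvFoldA, bsGo]
      | cons r rs' =>
        exfalso
        have h3 := (hC1 r (by simp)).2.1
        omega
    | cons c vt =>
      have h1 : ∀ r ∈ rs, 1 ≤ r + o := by
        intro r hr
        obtain ⟨ha, hb, hc⟩ := hC1 r hr
        by_contra hcon
        have h5 : r + o = 0 := by omega
        rw [h5] at hc
        simp only [Int.toNat_zero, List.drop_zero] at hc
        exact hP hc
      cases lv with
      | nil => exfalso; simp at hlv; simp at hv; omega
      | cons d lt =>
      simp only [List.map_cons]
      rw [pvFoldA_cons_shift m rs o _ _ h1]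
      rw [bsGo]
      rw [dif_neg (by
        rintro ⟨-, hpre⟩
        exact hP (List.isPrefixOf_iff_prefix.1 hpre))]
      rw [show List.drop 1 ((d :: lt) : List Char) = lt from rfl]
      simp only [List.flatten_cons, List.singleton_append, List.cons.injEq, true_and]
      apply ih (n - 1) (by simp at hv; omega) _ _ (by simp at hv ⊢; omega) (by simp at hlv ⊢; omega)
      · -- C1 shifted by one
        intro r hr
        obtain ⟨ha, hb, hc⟩ := hC1 r hr
        have h6 := h1 r hr
        refine ⟨by omega, by omega, ?_⟩
        have h7 : (r + (o - 1)).toNat + 1 = (r + o).toNat := by omega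
        have h8 : List.drop (r + o).toNat ((d :: lt) : List Char) = List.drop (r + (o - 1)).toNat lt := by
          rw [← h7, List.drop_succ_cons]
        rw [← h8]
        exact hc
      · -- C2 shifted by one
        intro j hj
        have h9 : ls <+: List.drop (j + 1) ((d :: lt) : List Char) := by
          rw [List.drop_succ_cons]; exact hj
        have h4 := hC2 (j + 1) h9
        rcases List.mem_map.1 h4 with ⟨a, ha, hao⟩
        exact List.mem_map.2 ⟨a, ha, by push_cast at hao ⊢; omega⟩
      · exact hPW

-- ===== VERDICT (by name: the statement is the Claim_ definition above) =====
theorem bold_substring_spec : Claim_equal_bold_substring := by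
  intro value substring _hdom hpre
  obtain ⟨hne, hov⟩ := hpre
  have hm : substring.toList.length ≠ 0 := fun h => hne (List.eq_nil_of_length_eq_zero h)
  have hlv : (PySem.Chars.lower value.toList).length = value.toList.length := by
    simp [PySem.Chars.lower]
  have hls : (PySem.Chars.lower substring.toList).length = substring.toList.length := by
    simp [PySem.Chars.lower]
  unfold Spec_bold_substring
  simp only [bold_substring, bold_substring_alt]
  refine congrArg String.ofList ?_
  rw [pvJoin_nil]
  rw [show PySem.Str.len substring = ((substring.toList.length : Nat) : Int) from rfl]
  rw [pvFoldl_eq_foldA substring.toList.length _ 0 _]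
  apply pvAux substring.toList.length hm (PySem.Chars.lower substring.toList)
      value.toList.length value.toList (PySem.Chars.lower value.toList) rfl hlv _ 0
  · -- every listed index is a real match, nonnegative, with room for the substring
    intro r hr
    obtain ⟨hmem, hpred⟩ := List.mem_filter.1 hr
    obtain ⟨hr0, hrlt⟩ := PySem.List.mem_pyRange_one.1 hmem
    rw [show PySem.List.len (PySem.Chars.lower value.toList) = ((PySem.Chars.lower value.toList).length : Int) from rfl, hlv] at hrlt
    have hpre' := List.isPrefixOf_iff_prefix.1 hpred
    have hlen := List.IsPrefix.length_le hpre'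
    simp only [List.length_drop, hls, hlv] at hlen
    refine ⟨by omega, by omega, ?_⟩
    simpa using hpre'
  · -- every match position is listed
    intro j hj
    have hlen := List.IsPrefix.length_le hj
    simp only [List.length_drop, hls, hlv] at hlen
    have hjlt : j < value.toList.length := by omega
    refine List.mem_map.2 ⟨(j : Int), ?_, by omega⟩
    refine List.mem_filter.2 ⟨PySem.List.mem_pyRange_one.2 ⟨by omega, ?_⟩, ?_⟩
    · rw [show PySem.List.len (PySem.Chars.lower value.toList) = ((PySem.Chars.lower value.toList).length : Int) from rfl, hlv]
      omega
    · rw [List.isPrefixOf_iff_prefix]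
      simpa using hj
  · -- the listed positions are spaced at least the substring length apart (from Pre_)
    apply List.Pairwise.imp_of_mem ?_ ((PySem.List.pairwise_lt_pyRange_one 0 _).filter _)
    intro a b ha hb hab
    obtain ⟨hamem, hapred⟩ := List.mem_filter.1 ha
    obtain ⟨hbmem, hbpred⟩ := List.mem_filter.1 hb
    obtain ⟨ha0, halt⟩ := PySem.List.mem_pyRange_one.1 hamem
    obtain ⟨hb0, hblt⟩ := PySem.List.mem_pyRange_one.1 hbmem
    rw [show PySem.List.len (PySem.Chars.lower value.toList) = ((PySem.Chars.lower value.toList).length : Int) from rfl, hlv] at halt hblt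
    by_contra hcon
    have hfalse := hov a.toNat (by omega) b.toNat (by omega) (by omega) (by omega) hapred
    rw [hbpred] at hfalse
    simp at hfalse
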